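-- pv_equiv track=rewrite | github.com/wfishell/MultiAgentGamePlay | Cops_And_RobbersTest.py | check_agent_status
-- ===== SOURCE A (Python) =====
-- from typing import List, Tuple, Set
--
-- SAFETY_ZONE_TOP_LEFTS = [(3, 3), (14, 14)]
--
-- def check_agent_status(agent_index: int, cop_positions: List[Tuple[int, int]], robber_positions: List[Tuple[int, int]]) -> bool:
--     """
--     Check if a robber is in a safety zone or adjacent to a cop.
--     """
--     robber_pos = robber_positions[agent_index]
--     for cop_pos in cop_positions:
--         if abs(robber_pos[0] - cop_pos[0]) <= 1 and abs(robber_pos[1] - cop_pos[1]) <= 1: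
--             return True
--     for (r, c) in SAFETY_ZONE_TOP_LEFTS:
--         if r <= robber_pos[0] < r + 2 and c <= robber_pos[1] < c + 2:
--             return True
--     return False
-- ===== SOURCE B (Python) =====
-- from typing import List, Tuple
--
-- SAFETY_ZONE_TOP_LEFTS = [(3, 3), (14, 14)]
--
-- SAFE_CELLS = [(r + i, c + j)
--               for (r, c) in SAFETY_ZONE_TOP_LEFTS
--               for i in (0, 1)
--               for j in (0, 1)]
--
-- def check_agent_status(agent_index: int, cop_positions: List[Tuple[int, int]], robber_positions: List[Tuple[int, int]]) -> bool:
--     rx, ry = robber_positions[agent_index]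
--     neighborhood = [(rx + dx, ry + dy) for dx in (-1, 0, 1) for dy in (-1, 0, 1)]
--     cop_set = set(cop_positions)
--     return not cop_set.isdisjoint(neighborhood) or (rx, ry) in SAFE_CELLS
-- ===== Notes on version B (the rewrite author's own statement) =====
-- stated objective: alternative
-- what changed: B materializes the robber's 3x3 neighborhood as a list and tests it for non-empty intersection with the cop set instead of scanning cops with a per-cop Chebyshev test, and replaces the two safety-zone range tests by membership of the robber cell in the precomputed list of the 8 safe cells.
import Mathlib
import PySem

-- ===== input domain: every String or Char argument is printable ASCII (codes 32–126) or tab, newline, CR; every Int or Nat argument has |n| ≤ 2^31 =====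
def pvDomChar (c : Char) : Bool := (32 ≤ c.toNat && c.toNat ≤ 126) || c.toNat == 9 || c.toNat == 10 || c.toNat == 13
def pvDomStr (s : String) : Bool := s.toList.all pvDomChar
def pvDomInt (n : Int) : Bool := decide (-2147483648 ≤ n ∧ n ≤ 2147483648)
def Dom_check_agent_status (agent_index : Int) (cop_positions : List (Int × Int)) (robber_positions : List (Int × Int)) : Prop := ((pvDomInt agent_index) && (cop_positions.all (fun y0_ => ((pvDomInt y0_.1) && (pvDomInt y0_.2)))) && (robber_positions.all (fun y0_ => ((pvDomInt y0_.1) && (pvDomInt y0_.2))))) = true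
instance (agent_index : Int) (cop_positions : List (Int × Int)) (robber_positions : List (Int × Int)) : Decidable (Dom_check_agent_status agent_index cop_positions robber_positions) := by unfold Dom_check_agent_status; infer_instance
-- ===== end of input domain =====

-- B replaces A's per-cop Chebyshev scan by intersecting the materialized 3x3 neighborhood with a cop set, and the range-based safety-zone tests by membership in the precomputed 8 safe cells (alternative structure, same cost).

-- ===== PORT A =====
def check_agent_status (agent_index : Int) (cop_positions : List (Int × Int)) (robber_positions : List (Int × Int)) : Bool :=
  match PySem.List.pyGet? robber_positions agent_index with
  | none => false  -- Python raises IndexError here; excluded by Pre_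
  | some robber_pos =>
    if cop_positions.any (fun cop_pos =>
        decide ((robber_pos.1 - cop_pos.1).natAbs ≤ 1) && decide ((robber_pos.2 - cop_pos.2).natAbs ≤ 1)) then
      true
    else if ([((3:Int),(3:Int)), (14,14)]).any (fun rc =>
        decide (rc.1 ≤ robber_pos.1) && decide (robber_pos.1 < rc.1 + 2) &&
        decide (rc.2 ≤ robber_pos.2) && decide (robber_pos.2 < rc.2 + 2)) then
      true
    else false

-- ===== PORT B =====
-- module-level SAFE_CELLS comprehension of Source B
def pvSafeCells : List (Int × Int) :=
  ([((3:Int),(3:Int)), (14,14)]).flatMap (fun rc =>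
    ([(0:Int), 1]).flatMap (fun i => ([(0:Int), 1]).map (fun j => (rc.1 + i, rc.2 + j))))

def check_agent_status_alt (agent_index : Int) (cop_positions : List (Int × Int)) (robber_positions : List (Int × Int)) : Bool :=
  match PySem.List.pyGet? robber_positions agent_index with
  | none => false  -- Python raises IndexError here; excluded by Pre_
  | some rp =>
    let neighborhood : List (Int × Int) :=
      ([(-1:Int), 0, 1]).flatMap (fun dx => ([(-1:Int), 0, 1]).map (fun dy => (rp.1 + dx, rp.2 + dy)))
    let cop_set : PySem.Set (Int × Int) := PySem.Set.ofList cop_positions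
    (neighborhood.any (fun cell => PySem.Set.contains cop_set cell)) || pvSafeCells.contains rp

-- ===== PRECONDITION & SPEC =====
-- Pre_ excludes exactly the indices where robber_positions[agent_index] raises IndexError.
def Pre_check_agent_status (agent_index : Int) (_cop_positions : List (Int × Int)) (robber_positions : List (Int × Int)) : Prop :=
  PySem.Raise.InRange robber_positions.length agent_index
instance (agent_index : Int) (cop_positions : List (Int × Int)) (robber_positions : List (Int × Int)) : Decidable (Pre_check_agent_status agent_index cop_positions robber_positions) := by unfold Pre_check_agent_status; infer_instance
def pvWitness_check_agent_status : Int × (List (Int × Int)) × (List (Int × Int)) := (0, [(4, 5)], [(4, 4)])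

def Spec_check_agent_status (agent_index : Int) (cop_positions : List (Int × Int)) (robber_positions : List (Int × Int)) (out : Bool) : Prop := out = check_agent_status_alt agent_index cop_positions robber_positions
instance (agent_index : Int) (cop_positions : List (Int × Int)) (robber_positions : List (Int × Int)) (out : Bool) : Decidable (Spec_check_agent_status agent_index cop_positions robber_positions out) := by unfold Spec_check_agent_status; infer_instance

-- ===== CLAIM (what is proved, stated in full; the proofs are below) =====
def Claim_equal_check_agent_status : Prop := ∀ (agent_index : Int) (cop_positions : List (Int × Int)) (robber_positions : List (Int × Int)), Dom_check_agent_status agent_index cop_positions robber_positions → Pre_check_agent_status agent_index cop_positions robber_positions → Spec_check_agent_status agent_index cop_positions robber_positions (check_agent_status agent_index cop_positions robber_positions)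

-- ===== LEMMAS AND PROOFS =====

-- The neighborhood-intersection probe hits iff some cop is at Chebyshev distance ≤ 1.
theorem neighborhood_eq_scan (rp : Int × Int) (cops : List (Int × Int)) :
    ((([(-1:Int), 0, 1]).flatMap (fun dx => ([(-1:Int), 0, 1]).map (fun dy => (rp.1 + dx, rp.2 + dy)))).any
        (fun cell => PySem.Set.contains (PySem.Set.ofList cops) cell))
    = cops.any (fun cp => decide ((rp.1 - cp.1).natAbs ≤ 1) && decide ((rp.2 - cp.2).natAbs ≤ 1)) := by
  apply Bool.eq_iff_iff.mpr
  simp only [List.any_eq_true, List.mem_flatMap, List.mem_map, PySem.Set.contains_iff,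
    PySem.Set.mem_ofList, decide_eq_true_eq, Bool.and_eq_true, List.mem_cons, List.not_mem_nil]
  constructor
  · rintro ⟨cell, ⟨dx, hdx, dy, hdy, rfl⟩, hmem⟩
    refine ⟨_, hmem, ?_, ?_⟩ <;>
      simp only [or_false] at hdx hdy <;>
      rcases hdx with h|h|h <;> rcases hdy with h'|h'|h' <;> subst h h' <;> omega
  · rintro ⟨cp, hcp, h1, h2⟩
    exact ⟨cp, ⟨cp.1 - rp.1, by omega, cp.2 - rp.2, by omega, by simp⟩, hcp⟩

-- Membership in the 8 precomputed safe cells equals A's two range tests.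
theorem safecells_eq_zone (rp : Int × Int) :
    pvSafeCells.contains rp
    = ([((3:Int),(3:Int)), (14,14)]).any (fun rc =>
        decide (rc.1 ≤ rp.1) && decide (rp.1 < rc.1 + 2) &&
        decide (rc.2 ≤ rp.2) && decide (rp.2 < rc.2 + 2)) := by
  rcases rp with ⟨x, y⟩
  apply Bool.eq_iff_iff.mpr
  simp [pvSafeCells, Prod.ext_iff]
  omega

-- ===== VERDICT (by name: the statement is the Claim_ definition above) =====
theorem check_agent_status_spec : Claim_equal_check_agent_status := by
  intro i cops robs _ hpre
  unfold Spec_check_agent_status check_agent_status check_agent_status_alt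
  cases h : PySem.List.pyGet? robs i with
  | none => exact absurd hpre ((PySem.List.pyGet?_eq_none_iff robs i).mp h)
  | some rp =>
    simp only [neighborhood_eq_scan, safecells_eq_zone]
    by_cases h1 : cops.any (fun cp => decide ((rp.1 - cp.1).natAbs ≤ 1) && decide ((rp.2 - cp.2).natAbs ≤ 1)) <;>
      (simp [h1]; try rfl)
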